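-- pv_equiv track=rewrite | github.com/creacher-creolio/mandarinTamer | src/mandarin_tamer/helpers_2/micro_conversion_steps.py | get_possible_sentence_phrases
-- ===== SOURCE A (Python) =====
-- def get_possible_sentence_phrases(sentence, max_phrase_length, sentence_length):
--     return sorted(
--         [
--             sentence[i : i + length]
--             for i in range(sentence_length)
--             for length in range(1, max_phrase_length + 1)
--             if i + length <= sentence_length
--         ],
--         key=lambda x: (-len(x), x),
--     )
-- ===== SOURCE B (Python) =====
-- def get_possible_sentence_phrases(sentence, max_phrase_length, sentence_length):
--     # Collect the same candidate slices (computed inner bound instead of a filter),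
--     # bucket them by actual length in one dict pass, then emit the distinct lengths
--     # in descending order, each bucket sorted lexicographically, instead of one
--     # global sort with the composite key (-len, x).
--     slices = [
--         sentence[i : i + length]
--         for i in range(sentence_length)
--         for length in range(1, min(max_phrase_length, sentence_length - i) + 1)
--     ]
--     buckets = {}
--     for s in slices:
--         buckets.setdefault(len(s), []).append(s)
--     out = []
--     for length in sorted(buckets, reverse=True):
--         out.extend(sorted(buckets[length]))
--     return out
-- ===== Notes on version B (the rewrite author's own statement) =====
-- stated objective: alternative
-- what changed: Replaces A's single global sort with the composite key (-len, x) by a bucket decomposition: the slices are generated with a computed inner bound instead of a filter, then the distinct actual lengths are emitted in descending order with each equal-length bucket sorted lexicographically on its own.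
import Mathlib
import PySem

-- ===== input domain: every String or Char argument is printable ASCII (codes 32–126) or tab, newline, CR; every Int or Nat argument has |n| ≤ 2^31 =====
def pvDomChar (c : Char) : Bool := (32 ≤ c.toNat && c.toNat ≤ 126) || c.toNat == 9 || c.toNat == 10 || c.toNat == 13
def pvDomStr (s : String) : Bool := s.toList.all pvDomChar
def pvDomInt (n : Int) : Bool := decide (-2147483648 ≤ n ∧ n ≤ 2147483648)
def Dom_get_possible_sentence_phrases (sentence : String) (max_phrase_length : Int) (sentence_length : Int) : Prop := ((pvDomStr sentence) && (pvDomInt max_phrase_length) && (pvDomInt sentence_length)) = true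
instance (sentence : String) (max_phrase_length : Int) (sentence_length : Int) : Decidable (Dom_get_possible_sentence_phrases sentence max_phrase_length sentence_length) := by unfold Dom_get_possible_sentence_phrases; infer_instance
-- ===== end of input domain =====

-- B replaces A's single global sort with composite key (-len, x) by a different decomposition:
-- generate the slices with a computed inner bound (no filter), bucket them by actual length in
-- one dict pass, then emit the distinct lengths in descending order, each bucket sorted
-- lexicographically (objective: alternative).

-- ===== PORT A =====
def get_possible_sentence_phrases (sentence : String) (max_phrase_length : Int) (sentence_length : Int) : List String :=
  PySem.List.sorted2
    ((PySem.List.pyRange 0 sentence_length 1).flatMap (fun i =>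
      (PySem.List.pyRange 1 (max_phrase_length + 1) 1).filterMap (fun length =>
        if i + length ≤ sentence_length then
          some (PySem.Str.slice sentence (some i) (some (i + length)))
        else none)))
    (fun x => -(PySem.Str.len x)) (fun x => x) false

-- ===== PORT B =====
def get_possible_sentence_phrases_alt (sentence : String) (max_phrase_length : Int) (sentence_length : Int) : List String :=
  let slices : List String :=
    (PySem.List.pyRange 0 sentence_length 1).flatMap (fun i =>
      (PySem.List.pyRange 1 (min max_phrase_length (sentence_length - i) + 1) 1).map (fun length =>
        PySem.Str.slice sentence (some i) (some (i + length))))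
  let buckets : PySem.Dict Int (List String) :=
    slices.foldl (fun d s => d.modify (PySem.Str.len s) [] (fun v => v ++ [s])) PySem.Dict.empty
  -- buckets[length] is always present in the loop below (length ranges over the keys),
  -- so the lookup is ported as getD
  (PySem.List.sorted buckets.keys (fun x => x) true).foldl
    (fun out L =>
      out ++ PySem.List.sorted (buckets.getD L []) (fun x => x) false)
    []

-- ===== PRECONDITION & SPEC =====
def Spec_get_possible_sentence_phrases (sentence : String) (max_phrase_length : Int) (sentence_length : Int) (out : List String) : Prop := out = get_possible_sentence_phrases_alt sentence max_phrase_length sentence_length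
instance (sentence : String) (max_phrase_length : Int) (sentence_length : Int) (out : List String) : Decidable (Spec_get_possible_sentence_phrases sentence max_phrase_length sentence_length out) := by unfold Spec_get_possible_sentence_phrases; infer_instance

-- ===== CLAIM (what is proved, stated in full; the proofs are below) =====
def Claim_equal_get_possible_sentence_phrases : Prop := ∀ (sentence : String) (max_phrase_length : Int) (sentence_length : Int), Dom_get_possible_sentence_phrases sentence max_phrase_length sentence_length → Spec_get_possible_sentence_phrases sentence max_phrase_length sentence_length (get_possible_sentence_phrases sentence max_phrase_length sentence_length)

-- ===== LEMMAS AND PROOFS =====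

-- The order "length strictly longer, or same length and lexicographically ≤" that A's
-- composite sort key (-len(x), x) realises.
def pvR (a b : String) : Prop :=
  PySem.Str.len b < PySem.Str.len a ∨ (PySem.Str.len a = PySem.Str.len b ∧ a ≤ b)

-- The boolean comparator sorted2 uses for key (-len(x), x).
def pvLt (a b : String) : Bool :=
  decide ((-(PySem.Str.len a) : Int) < -(PySem.Str.len b)) ||
    (!decide ((-(PySem.Str.len b) : Int) < -(PySem.Str.len a)) && decide (a < b))

lemma pvLt_true {a b : String} (h : pvLt a b = true) : pvR a b := by
  unfold pvLt at h; unfold pvR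
  simp only [Bool.or_eq_true, Bool.and_eq_true, Bool.not_eq_true', decide_eq_true_eq,
    decide_eq_false_iff_not] at h
  rcases h with h | ⟨h1, h2⟩
  · exact Or.inl (neg_lt_neg_iff.mp h)
  · have hle : PySem.Str.len b ≤ PySem.Str.len a := neg_le_neg_iff.mp (not_lt.mp h1)
    rcases lt_or_eq_of_le hle with hlt | heq
    · exact Or.inl hlt
    · exact Or.inr ⟨heq.symm, le_of_lt h2⟩

lemma pvLt_false {a b : String} (h : pvLt a b = false) : pvR b a := by
  unfold pvLt at h; unfold pvR
  simp only [Bool.or_eq_false_iff, Bool.and_eq_false_iff, Bool.not_eq_false', decide_eq_true_eq,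
    decide_eq_false_iff_not] at h
  rcases h with ⟨h1, h2 | h2⟩
  · exact Or.inl (neg_lt_neg_iff.mp h2)
  · have hle : PySem.Str.len a ≤ PySem.Str.len b := neg_le_neg_iff.mp (not_lt.mp h1)
    rcases lt_or_eq_of_le hle with hlt | heq
    · exact Or.inl hlt
    · exact Or.inr ⟨heq.symm, le_of_not_gt h2⟩

lemma pvR_trans {a b c : String} (h1 : pvR a b) (h2 : pvR b c) : pvR a c := by
  unfold pvR at *
  rcases h1 with h1 | ⟨h1, h1'⟩ <;> rcases h2 with h2 | ⟨h2, h2'⟩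
  · exact Or.inl (lt_trans h2 h1)
  · exact Or.inl (h2 ▸ h1)
  · exact Or.inl (h1 ▸ h2)
  · exact Or.inr ⟨h1.trans h2, le_trans h1' h2'⟩

lemma pvR_antisymm {a b : String} (h1 : pvR a b) (h2 : pvR b a) : a = b := by
  unfold pvR at *
  rcases h1 with h1 | ⟨h1, h1'⟩ <;> rcases h2 with h2 | ⟨h2, h2'⟩
  · exact absurd h1 (lt_asymm h2)
  · rw [h2] at h1; exact absurd h1 (lt_irrefl _)
  · rw [h1] at h2; exact absurd h2 (lt_irrefl _)
  · exact le_antisymm h1' h2'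

lemma pv_insert_pairwise (x : String) (ys : List String) (h : ys.Pairwise pvR) :
    (PySem.List.insertBy pvLt x ys).Pairwise pvR := by
  induction ys with
  | nil => simp [PySem.List.insertBy]
  | cons y ys ih =>
    rw [PySem.List.insertBy.eq_2]
    rcases List.pairwise_cons.mp h with ⟨hy, hys⟩
    by_cases hxy : pvLt x y = true
    · simp only [hxy]
      refine List.pairwise_cons.mpr ⟨?_, h⟩
      intro z hz
      rcases List.mem_cons.mp hz with rfl | hz
      · exact pvLt_true hxy
      · exact pvR_trans (pvLt_true hxy) (hy z hz)
    · rw [Bool.not_eq_true] at hxy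
      simp only [hxy]
      refine List.pairwise_cons.mpr ⟨?_, ih hys⟩
      intro z hz
      rcases (PySem.List.mem_insertBy pvLt x z ys).mp hz with rfl | hz
      · exact pvLt_false hxy
      · exact hy z hz

lemma pv_foldl_pairwise (xs acc : List String) (h : acc.Pairwise pvR) :
    (xs.foldl (fun acc x => PySem.List.insertBy pvLt x acc) acc).Pairwise pvR := by
  induction xs generalizing acc with
  | nil => exact h
  | cons x xs ih => exact ih _ (pv_insert_pairwise x acc h)

lemma pv_sorted2_pairwise (xs : List String) :
    (PySem.List.sorted2 xs (fun x => -(PySem.Str.len x)) (fun x => x) false).Pairwise pvR := by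
  exact pv_foldl_pairwise xs [] List.Pairwise.nil

-- All-true / all-false filterMap reductions for the inner loop.
lemma pv_filterMap_all_true {α β : Type} (xs : List α) (p : α → Prop) [DecidablePred p]
    (f : α → β) (h : ∀ x ∈ xs, p x) :
    (xs.filterMap (fun x => if p x then some (f x) else none)) = xs.map f := by
  induction xs with
  | nil => rfl
  | cons x xs ih =>
    simp only [List.filterMap_cons, if_pos (h x (List.mem_cons_self)), List.map_cons]
    exact congrArg _ (ih (fun y hy => h y (List.mem_cons_of_mem x hy)))

lemma pv_filterMap_all_false {α β : Type} (xs : List α) (p : α → Prop) [DecidablePred p]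
    (f : α → β) (h : ∀ x ∈ xs, ¬ p x) :
    (xs.filterMap (fun x => if p x then some (f x) else none)) = [] := by
  induction xs with
  | nil => rfl
  | cons x xs ih =>
    simp only [List.filterMap_cons, if_neg (h x (List.mem_cons_self))]
    exact ih (fun y hy => h y (List.mem_cons_of_mem x hy))

-- A's filtered inner range is B's computed inner range.
lemma pv_inner_eq (f : Int → String) (i m n : Int) :
    ((PySem.List.pyRange 1 (m + 1) 1).filterMap (fun l => if i + l ≤ n then some (f l) else none))
      = (PySem.List.pyRange 1 (min m (n - i) + 1) 1).map f := by
  by_cases hk : min m (n - i) ≤ 0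
  · have hnil : PySem.List.pyRange 1 (min m (n - i) + 1) 1 = [] :=
      PySem.List.pyRange_one_eq_nil (by omega)
    rw [hnil, List.map_nil]
    apply pv_filterMap_all_false
    intro l hl
    rcases PySem.List.mem_pyRange_one.mp hl with ⟨h1, h2⟩
    omega
  · rw [PySem.List.pyRange_one_append 1 (min m (n - i) + 1) (m + 1) (by omega) (by omega),
      List.filterMap_append]
    rw [pv_filterMap_all_true _ _ f (by
      intro l hl
      rcases PySem.List.mem_pyRange_one.mp hl with ⟨h1, h2⟩
      omega)]
    rw [pv_filterMap_all_false _ _ f (by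
      intro l hl
      rcases PySem.List.mem_pyRange_one.mp hl with ⟨h1, h2⟩
      omega)]
    rw [List.append_nil]

-- Emitting, for each length of a duplicate-free list covering all actual lengths,
-- the equal-length bucket, is a permutation of the whole list of slices.
lemma pv_partition_perm (Ls : List Int) (xs : List String) (hnd : Ls.Nodup)
    (hall : ∀ s ∈ xs, PySem.Str.len s ∈ Ls) :
    (Ls.flatMap (fun L => xs.filter (fun s => PySem.Str.len s == L))).Perm xs := by
  induction Ls generalizing xs with
  | nil =>
    cases xs with
    | nil => simp
    | cons x xs => exact absurd (hall x List.mem_cons_self) (by simp)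
  | cons L Ls ih =>
    rw [List.flatMap_cons]
    have hcongr : ∀ L' ∈ Ls,
        xs.filter (fun s => PySem.Str.len s == L')
          = (xs.filter (fun s => !(PySem.Str.len s == L))).filter (fun s => PySem.Str.len s == L') := by
      intro L' hL'
      rw [List.filter_filter]
      have hne : L' ≠ L := fun he => (List.nodup_cons.mp hnd).1 (he ▸ hL')
      apply List.filter_congr
      intro s _
      by_cases hx : PySem.Str.len s = L
      all_goals simp only [PySem.Str.len_eq] at hx
      · have h1 : (PySem.Str.len s == L') = false := by
          simp only [PySem.Str.len_eq, beq_eq_false_iff_ne, ne_eq]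
          omega
        have h2 : (PySem.Str.len s == L) = true := by
          simp only [PySem.Str.len_eq, beq_iff_eq]; exact hx
        rw [h1, h2]; simp
      · have h2 : (PySem.Str.len s == L) = false := by
          simp only [PySem.Str.len_eq, beq_eq_false_iff_ne, ne_eq]; exact hx
        rw [h2]; simp
    have hmapeq : Ls.flatMap (fun L' => xs.filter (fun s => PySem.Str.len s == L'))
        = Ls.flatMap (fun L' => (xs.filter (fun s => !(PySem.Str.len s == L))).filter
            (fun s => PySem.Str.len s == L')) := by
      rw [List.flatMap_def, List.flatMap_def]
      exact congrArg _ (List.map_congr_left hcongr)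
    rw [hmapeq]
    have hperm := ih (xs.filter (fun s => !(PySem.Str.len s == L))) (List.nodup_cons.mp hnd).2 (by
      intro s hs
      rcases List.mem_filter.mp hs with ⟨hs1, hs2⟩
      have := hall s hs1
      rcases List.mem_cons.mp this with h | h
      · exact absurd h (by simpa using hs2)
      · exact h)
    exact (hperm.append_left _).trans (List.filter_append_perm _ xs)

-- A strictly-descending list of lengths, each bucket internally pvR-pairwise with
-- elements of exactly that length, concatenates to a pvR-pairwise list.
lemma pv_pairwise_flatMap (Ls : List Int) (g : Int → List String)
    (hLs : Ls.Pairwise (fun a b => b < a))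
    (hg : ∀ L ∈ Ls, (g L).Pairwise pvR)
    (hlen : ∀ L ∈ Ls, ∀ s ∈ g L, PySem.Str.len s = L) :
    (Ls.flatMap g).Pairwise pvR := by
  induction Ls with
  | nil => simp
  | cons L Ls ih =>
    rw [List.flatMap_cons]
    rcases List.pairwise_cons.mp hLs with ⟨hL, hLs'⟩
    apply List.pairwise_append.mpr
    refine ⟨hg L List.mem_cons_self, ih hLs'
      (fun L' h => hg L' (List.mem_cons_of_mem L h))
      (fun L' h => hlen L' (List.mem_cons_of_mem L h)), ?_⟩
    intro s hs t ht
    rcases List.mem_flatMap.mp ht with ⟨L', hL', ht'⟩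
    left
    rw [hlen L List.mem_cons_self s hs, hlen L' (List.mem_cons_of_mem L hL') t ht']
    exact hL L' hL'

-- ===== VERDICT (by name: the statement is the Claim_ definition above) =====
theorem get_possible_sentence_phrases_spec : Claim_equal_get_possible_sentence_phrases := by
  intro sentence m n _
  unfold Spec_get_possible_sentence_phrases
  unfold get_possible_sentence_phrases get_possible_sentence_phrases_alt
  set slices : List String :=
    (PySem.List.pyRange 0 n 1).flatMap (fun i =>
      (PySem.List.pyRange 1 (min m (n - i) + 1) 1).map (fun length =>
        PySem.Str.slice sentence (some i) (some (i + length)))) with hslices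
  -- A's comprehension generates exactly `slices`
  have hgen : (PySem.List.pyRange 0 n 1).flatMap (fun i =>
      (PySem.List.pyRange 1 (m + 1) 1).filterMap (fun length =>
        if i + length ≤ n then some (PySem.Str.slice sentence (some i) (some (i + length))) else none))
      = slices := by
    rw [hslices]
    exact congrArg (fun φ => List.flatMap φ (PySem.List.pyRange 0 n 1)) (funext fun i =>
      pv_inner_eq (fun length => PySem.Str.slice sentence (some i) (some (i + length))) i m n)
  rw [hgen]
  set buckets : PySem.Dict Int (List String) :=
    slices.foldl (fun d s => d.modify (PySem.Str.len s) [] (fun v => v ++ [s])) PySem.Dict.empty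
    with hbuckets
  have hbuck : ∀ L : Int, buckets.getD L [] = slices.filter (fun s => PySem.Str.len s == L) := by
    intro L
    have h1 : buckets = (slices.map (fun s => (PySem.Str.len s, s))).foldl
        (fun d p => d.modify p.1 [] (fun v => v ++ [p.2])) PySem.Dict.empty := by
      rw [hbuckets, List.foldl_map]
    rw [h1, PySem.Dict.getD_foldl_modify_append, PySem.Dict.getD_empty, List.nil_append,
      List.filter_map, List.map_map]
    simp [Function.comp_def]
  have hkeys : buckets.keys = PySem.Set.ofList (slices.map (fun s => PySem.Str.len s)) := by
    rw [hbuckets, PySem.Dict.keys_foldl_modify_key slices (fun s => PySem.Str.len s) []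
      (fun _ s => (fun v => v ++ [s])), PySem.Dict.keys_empty, PySem.Set.update_nil_left]
  set SL : List Int := PySem.List.sorted buckets.keys (fun x => x) true with hSL
  rw [PySem.List.foldl_append_eq_flatMap
    (fun L => PySem.List.sorted (buckets.getD L []) (fun x => x) false) SL [], List.nil_append]
  have hfun : (fun L => PySem.List.sorted (buckets.getD L []) (fun x : String => x) false)
      = (fun L => PySem.List.sorted (slices.filter (fun s => PySem.Str.len s == L))
          (fun x : String => x) false) := funext fun L => by rw [hbuck]
  rw [hfun]
  -- properties of the descending distinct-length list SL
  have hnd : SL.Nodup := by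
    rw [hSL, hkeys]
    exact ((PySem.List.sorted_perm _ _ _).nodup_iff).mpr (PySem.Set.nodup_ofList _)
  have hdesc : SL.Pairwise (fun a b => b < a) := by
    have h1 : SL.Pairwise (fun a b : Int => b ≤ a) := PySem.List.sorted_pairwise_rev _ _
    have h2 : SL.Pairwise (fun a b : Int => a ≠ b) := hnd
    exact (h1.and h2).imp (fun h => lt_of_le_of_ne h.1 (Ne.symm h.2))
  have hall : ∀ s ∈ slices, PySem.Str.len s ∈ SL := by
    intro s hs
    rw [hSL, PySem.List.mem_sorted, hkeys, PySem.Set.mem_ofList]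
    exact List.mem_map_of_mem hs
  -- A's result and B's result are permutations of each other
  have hpermA := PySem.List.sorted2_perm slices (fun x => -(PySem.Str.len x)) (fun x : String => x) false
  have hpermB : (SL.flatMap (fun L =>
      PySem.List.sorted (slices.filter (fun s => PySem.Str.len s == L)) (fun x => x) false)).Perm
      slices := by
    have hstep : (SL.flatMap (fun L =>
        PySem.List.sorted (slices.filter (fun s => PySem.Str.len s == L)) (fun x => x) false)).Perm
        (SL.flatMap (fun L => slices.filter (fun s => PySem.Str.len s == L))) := by
      apply List.Perm.flatMap_left
      intro L _
      exact PySem.List.sorted_perm _ _ _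
    exact hstep.trans (pv_partition_perm SL slices hnd hall)
  -- both are pvR-pairwise
  have hpwA := pv_sorted2_pairwise slices
  have hpwB : (SL.flatMap (fun L =>
      PySem.List.sorted (slices.filter (fun s => PySem.Str.len s == L)) (fun x => x) false)).Pairwise
      pvR := by
    apply pv_pairwise_flatMap SL _ hdesc
    · intro L _
      have h1 := PySem.List.sorted_pairwise (slices.filter (fun s => PySem.Str.len s == L))
        (fun x : String => x)
      refine h1.imp_of_mem ?_
      intro a b ha hb hab
      have hla : PySem.Str.len a = L := by
        have := (List.mem_filter.mp ((PySem.List.mem_sorted _ _ _ _).mp ha)).2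
        simpa using this
      have hlb : PySem.Str.len b = L := by
        have := (List.mem_filter.mp ((PySem.List.mem_sorted _ _ _ _).mp hb)).2
        simpa using this
      exact Or.inr ⟨hla.trans hlb.symm, hab⟩
    · intro L _ s hs
      have := (List.mem_filter.mp ((PySem.List.mem_sorted _ _ _ _).mp hs)).2
      simpa using this
  -- a pvR-sorted permutation is unique
  exact List.Perm.eq_of_pairwise (fun a b _ _ h1 h2 => pvR_antisymm h1 h2) hpwA hpwB
    (hpermA.trans hpermB.symm)
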